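-- pv_equiv track=rewrite | github.com/pypi-data/pypi-mirror-370 | packages/lexer-fdfattor-2025/lexer_fdfattor_2025-1.0.1.tar.gz/lexer_fdfattor_2025-1.0.1/lexer/core.py | afd_dos_puntos
-- ===== SOURCE A (Python) =====
-- ESTADO_FINAL = "ESTADO FINAL"
--
-- ESTADO_NO_FINAL = "NO ACEPTADO"
--
-- ESTADO_TRAMPA = "EN ESTADO TRAMPA"
--
-- def afd_dos_puntos(lexema):
--     estado = 0
--     estados_finales = [1]
--     for c in lexema:
--         if estado == 0 and c == ':':
--             estado = 1
--         else:
--             estado = -1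
--
--     if estado == -1:
--         return ESTADO_TRAMPA
--     if estado in estados_finales:
--         return ESTADO_FINAL
--     else:
--         return ESTADO_NO_FINAL
-- ===== SOURCE B (Python) =====
-- ESTADO_FINAL = "ESTADO FINAL"
-- ESTADO_NO_FINAL = "NO ACEPTADO"
-- ESTADO_TRAMPA = "EN ESTADO TRAMPA"
--
-- def afd_dos_puntos(lexema):
--     xs = list(lexema)
--     if xs == [':']:
--         return ESTADO_FINAL
--     if xs == []:
--         return ESTADO_NO_FINAL
--     return ESTADO_TRAMPA
-- ===== Notes on version B (the rewrite author's own statement) =====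
-- stated objective: simpler
-- what changed: Replaces the per-character DFA state loop with a single closed-form comparison of the materialized input against the one accepted token [':'] (empty input handled separately).
import Mathlib
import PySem

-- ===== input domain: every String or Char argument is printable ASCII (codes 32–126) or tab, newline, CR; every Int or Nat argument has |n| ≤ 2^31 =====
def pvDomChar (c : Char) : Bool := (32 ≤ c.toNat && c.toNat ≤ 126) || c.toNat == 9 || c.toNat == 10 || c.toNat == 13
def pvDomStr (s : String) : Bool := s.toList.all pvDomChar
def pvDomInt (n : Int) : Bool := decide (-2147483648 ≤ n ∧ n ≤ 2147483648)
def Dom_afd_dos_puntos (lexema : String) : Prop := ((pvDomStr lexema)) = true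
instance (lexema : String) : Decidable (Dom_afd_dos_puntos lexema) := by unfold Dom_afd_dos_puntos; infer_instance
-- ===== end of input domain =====

-- B replaces the DFA simulation loop with a closed-form comparison against the one accepted token (objective: simpler).

-- ===== PORT A =====
-- per-character DFA transition, exactly A's loop body
def afdStep (estado : Int) (c : Char) : Int :=
  if estado = 0 ∧ c = ':' then 1 else -1

def afd_dos_puntos (lexema : String) : String :=
  let estado := lexema.toList.foldl afdStep 0
  if estado = -1 then "EN ESTADO TRAMPA"
  else if estado ∈ [(1 : Int)] then "ESTADO FINAL"
  else "NO ACEPTADO"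

-- ===== PORT B =====
def afd_dos_puntos_alt (lexema : String) : String :=
  let xs := lexema.toList
  if xs = [':'] then "ESTADO FINAL"
  else if xs = [] then "NO ACEPTADO"
  else "EN ESTADO TRAMPA"

-- ===== PRECONDITION & SPEC =====
def Spec_afd_dos_puntos (lexema : String) (out : String) : Prop := out = afd_dos_puntos_alt lexema
instance (lexema : String) (out : String) : Decidable (Spec_afd_dos_puntos lexema out) := by unfold Spec_afd_dos_puntos; infer_instance

-- ===== CLAIM (what is proved, stated in full; the proofs are below) =====
def Claim_equal_afd_dos_puntos : Prop := ∀ (lexema : String), Dom_afd_dos_puntos lexema → Spec_afd_dos_puntos lexema (afd_dos_puntos lexema)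

-- ===== LEMMAS AND PROOFS =====

-- from any non-zero state, a nonempty rest of the input drives the DFA to the trap state
theorem afdStep_trap (l : List Char) (s : Int) (hs : s ≠ 0) (hl : l ≠ []) :
    l.foldl afdStep s = -1 := by
  induction l generalizing s with
  | nil => exact absurd rfl hl
  | cons c cs ih =>
    have hstep : afdStep s c = -1 := by unfold afdStep; simp [hs]
    rw [List.foldl_cons, hstep]
    cases cs with
    | nil => simp [List.foldl]
    | cons d ds => exact ih (-1) (by decide) (by simp)

-- ===== VERDICT (by name: the statement is the Claim_ definition above) =====
theorem afd_dos_puntos_spec : Claim_equal_afd_dos_puntos := by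
  intro lexema _
  unfold Spec_afd_dos_puntos afd_dos_puntos afd_dos_puntos_alt
  cases h : lexema.toList with
  | nil => simp [List.foldl]
  | cons c cs =>
    cases cs with
    | nil =>
      by_cases hc : c = ':'
      · simp [hc, List.foldl, afdStep]
      · simp [List.foldl, afdStep, hc]
    | cons d ds =>
      have h1 : (d :: ds).foldl afdStep (afdStep 0 c) = -1 := by
        apply afdStep_trap _ _ _ (by simp)
        unfold afdStep; split <;> decide
      simp [List.foldl_cons, h1]
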